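-- pv_equiv track=rewrite | github.com/gsusI/vota-con-la-chola | scripts/export_explorer_sports_snapshot.py | extract_municipality_fields
-- ===== SOURCE A (Python) =====
-- from typing import Any, Dict, List
--
-- def normalize_municipality_code(value: Any) -> str:
--     token = "".join(ch for ch in str(value or "") if ch.isdigit())
--     if len(token) == 5:
--         return token
--     return ""
--
-- def is_municipal_level(value: Any) -> bool:
--     normalized = str(value or "").strip().lower()
--     return bool(
--         normalized and (
--             "municipal" in normalized
--             or "ayuntamiento" in normalized
--             or "concejal" in normalized
--             or "local" in normalized
--         )
--     )
--
-- def municipality_name(value: Any, fallback: Any = "Sin municipio") -> str: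
--     text = str(value or "").strip()
--     return text or str(fallback or "").strip() or "Sin municipio"
--
-- def extract_municipality_fields(row: Dict[str, Any], population_by_code: Dict[str, int]) -> tuple[str, str, int | None]:
--     candidates = [
--         (row.get("mandate_territory_code"), row.get("mandate_territory_name"), row.get("mandate_territory_level")),
--         (row.get("institution_territory_code"), row.get("institution_territory_name"), row.get("institution_territory_level")),
--         (row.get("person_territory_code"), row.get("person_territory_name"), row.get("person_territory_level")),
--     ]
--
--     for code, name, level in candidates:
--         normalized = normalize_municipality_code(code)
--         if normalized and is_municipal_level(level):
--             return normalized, municipality_name(name), population_by_code.get(normalized)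
--
--     for code, name, level in candidates:
--         normalized = normalize_municipality_code(code)
--         if normalized and population_by_code.get(normalized) is not None:
--             return normalized, municipality_name(name), population_by_code.get(normalized)
--
--     for code, name, _level in candidates:
--         normalized = normalize_municipality_code(code)
--         if normalized:
--             return normalized, municipality_name(name), population_by_code.get(normalized)
--
--     return "", "", None
-- ===== SOURCE B (Python) =====
-- def normalize_municipality_code(value):
--     token = "".join(ch for ch in str(value or "") if ch.isdigit())
--     return token if len(token) == 5 else ""
--
-- def is_municipal_level(value):
--     normalized = str(value or "").strip().lower()
--     return bool(normalized and (
--         "municipal" in normalized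
--         or "ayuntamiento" in normalized
--         or "concejal" in normalized
--         or "local" in normalized
--     ))
--
-- def municipality_name(value, fallback="Sin municipio"):
--     text = str(value or "").strip()
--     return text or str(fallback or "").strip() or "Sin municipio"
--
-- def extract_municipality_fields(row, population_by_code):
--     # Single pass: rank each candidate by a priority tier, keep the earliest
--     # candidate with the strictly best tier.
--     best = None  # (tier, normalized, raw_name)
--     for prefix in ("mandate_territory", "institution_territory", "person_territory"):
--         normalized = normalize_municipality_code(row.get(prefix + "_code"))
--         if not normalized:
--             continue
--         if is_municipal_level(row.get(prefix + "_level")):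
--             tier = 0
--         elif population_by_code.get(normalized) is not None:
--             tier = 1
--         else:
--             tier = 2
--         if best is None or tier < best[0]:
--             best = (tier, normalized, row.get(prefix + "_name"))
--     if best is None:
--         return "", "", None
--     _tier, normalized, name = best
--     return normalized, municipality_name(name), population_by_code.get(normalized)
-- ===== Notes on version B (the rewrite author's own statement) =====
-- stated objective: alternative
-- what changed: Replaced A's three sequential early-return passes over the candidate list with a single pass that assigns each candidate a priority tier (municipal level < known population < any 5-digit code) and keeps the earliest candidate of the strictly best tier.
import Mathlib
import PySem

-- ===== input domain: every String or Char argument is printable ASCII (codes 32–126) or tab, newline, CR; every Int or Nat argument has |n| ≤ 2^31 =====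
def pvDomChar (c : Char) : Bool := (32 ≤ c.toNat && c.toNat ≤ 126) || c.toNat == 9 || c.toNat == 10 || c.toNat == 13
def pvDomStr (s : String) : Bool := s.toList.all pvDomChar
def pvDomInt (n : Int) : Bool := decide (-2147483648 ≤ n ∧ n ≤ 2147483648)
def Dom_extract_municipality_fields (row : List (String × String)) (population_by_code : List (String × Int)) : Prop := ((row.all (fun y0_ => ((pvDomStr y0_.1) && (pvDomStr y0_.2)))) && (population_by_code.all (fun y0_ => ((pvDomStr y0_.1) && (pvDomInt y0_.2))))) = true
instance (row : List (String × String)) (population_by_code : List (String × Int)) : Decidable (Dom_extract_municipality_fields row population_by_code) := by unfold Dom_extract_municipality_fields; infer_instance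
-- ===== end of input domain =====

-- B replaces A's three sequential early-return passes with a single pass that ranks each
-- candidate by a priority tier and keeps the earliest strictly-best candidate (alternative decomposition).


-- ===== PORT A =====
-- str(value or "") for an Optional[str] value: None and "" both give ""
def pvStrOf (o : Option String) : String := o.getD ""

-- "".join(ch for ch in str(value or "") if ch.isdigit()); returned iff len == 5
def pvNormCode (o : Option String) : String :=
  let token := String.ofList ((pvStrOf o).toList.filter PySem.Str.isdigit)
  if token.toList.length = 5 then token else ""

def pvIsMunicipalLevel (o : Option String) : Bool :=
  let normalized := PySem.Str.lower (PySem.Str.strip (pvStrOf o))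
  normalized != "" &&
    (PySem.Str.isIn "municipal" normalized || PySem.Str.isIn "ayuntamiento" normalized ||
     PySem.Str.isIn "concejal" normalized || PySem.Str.isIn "local" normalized)

def pvMuniName (o : Option String) : String :=
  let text := PySem.Str.strip (pvStrOf o)
  if text != "" then text
  else
    let fb := PySem.Str.strip "Sin municipio"
    if fb != "" then fb else "Sin municipio"

-- first pass: normalized and is_municipal_level(level)
def pvPass1 (p : PySem.Dict String Int) :
    List (Option String × Option String × Option String) → Option (String × String × Option Int)
  | [] => none
  | (code, name, level) :: rest =>
      let normalized := pvNormCode code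
      if normalized != "" && pvIsMunicipalLevel level then
        some (normalized, pvMuniName name, p.get? normalized)
      else pvPass1 p rest

-- second pass: normalized and population_by_code.get(normalized) is not None
def pvPass2 (p : PySem.Dict String Int) :
    List (Option String × Option String × Option String) → Option (String × String × Option Int)
  | [] => none
  | (code, name, _level) :: rest =>
      let normalized := pvNormCode code
      if normalized != "" && (p.get? normalized).isSome then
        some (normalized, pvMuniName name, p.get? normalized)
      else pvPass2 p rest

-- third pass: normalized only
def pvPass3 (p : PySem.Dict String Int) :
    List (Option String × Option String × Option String) → Option (String × String × Option Int)
  | [] => none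
  | (code, name, _level) :: rest =>
      let normalized := pvNormCode code
      if normalized != "" then
        some (normalized, pvMuniName name, p.get? normalized)
      else pvPass3 p rest

def extract_municipality_fields (row : List (String × String)) (population_by_code : List (String × Int)) : String × String × Option Int :=
  let d := PySem.Dict.mk row
  let p := PySem.Dict.mk population_by_code
  let candidates : List (Option String × Option String × Option String) :=
    [ (d.get? "mandate_territory_code", d.get? "mandate_territory_name", d.get? "mandate_territory_level"),
      (d.get? "institution_territory_code", d.get? "institution_territory_name", d.get? "institution_territory_level"),
      (d.get? "person_territory_code", d.get? "person_territory_name", d.get? "person_territory_level") ]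
  match pvPass1 p candidates with
  | some r => r
  | none =>
    match pvPass2 p candidates with
    | some r => r
    | none =>
      match pvPass3 p candidates with
      | some r => r
      | none => ("", "", none)

-- ===== PORT B =====
-- single pass keeping (tier, normalized, raw name) of the earliest strictly-best candidate
def pvBLoop (d : PySem.Dict String String) (p : PySem.Dict String Int) :
    List (String × String × String) → Option (Nat × String × Option String) → Option (Nat × String × Option String)
  | [], best => best
  | (code_key, name_key, level_key) :: rest, best =>
      let normalized := pvNormCode (d.get? code_key)
      if normalized == "" then pvBLoop d p rest best
      else
        let tier : Nat :=
          if pvIsMunicipalLevel (d.get? level_key) then 0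
          else if (p.get? normalized).isSome then 1
          else 2
        let best' :=
          match best with
          | none => some (tier, normalized, d.get? name_key)
          | some (bt, _, _) =>
              if tier < bt then some (tier, normalized, d.get? name_key) else best
        pvBLoop d p rest best'

def extract_municipality_fields_alt (row : List (String × String)) (population_by_code : List (String × Int)) : String × String × Option Int :=
  let d := PySem.Dict.mk row
  let p := PySem.Dict.mk population_by_code
  match pvBLoop d p
    [ ("mandate_territory_code", "mandate_territory_name", "mandate_territory_level"),
      ("institution_territory_code", "institution_territory_name", "institution_territory_level"),
      ("person_territory_code", "person_territory_name", "person_territory_level") ] none with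
  | none => ("", "", none)
  | some (_tier, normalized, name) => (normalized, pvMuniName name, p.get? normalized)

-- ===== PRECONDITION & SPEC =====
def Spec_extract_municipality_fields (row : List (String × String)) (population_by_code : List (String × Int)) (out : String × String × Option Int) : Prop := out = extract_municipality_fields_alt row population_by_code
instance (row : List (String × String)) (population_by_code : List (String × Int)) (out : String × String × Option Int) : Decidable (Spec_extract_municipality_fields row population_by_code out) := by unfold Spec_extract_municipality_fields; infer_instance

-- ===== CLAIM (what is proved, stated in full; the proofs are below) =====
def Claim_equal_extract_municipality_fields : Prop := ∀ (row : List (String × String)) (population_by_code : List (String × Int)), Dom_extract_municipality_fields row population_by_code → Spec_extract_municipality_fields row population_by_code (extract_municipality_fields row population_by_code)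

-- ===== LEMMAS AND PROOFS =====
theorem pv_p1_nil (p : PySem.Dict String Int) : pvPass1 p [] = none := rfl

theorem pv_p2_nil (p : PySem.Dict String Int) : pvPass2 p [] = none := rfl

theorem pv_p3_nil (p : PySem.Dict String Int) : pvPass3 p [] = none := rfl

theorem pv_bl_nil (d : PySem.Dict String String) (p : PySem.Dict String Int)
    (best : Option (Nat × String × Option String)) : pvBLoop d p [] best = best := rfl

theorem pv_p1_cons (p : PySem.Dict String Int) (code name level : Option String)
    (rest : List (Option String × Option String × Option String)) :
    pvPass1 p ((code, name, level) :: rest) =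
      (if pvNormCode code != "" && pvIsMunicipalLevel level then
        some (pvNormCode code, pvMuniName name, p.get? (pvNormCode code))
      else pvPass1 p rest) := by
  simp only [pvPass1]

theorem pv_p2_cons (p : PySem.Dict String Int) (code name level : Option String)
    (rest : List (Option String × Option String × Option String)) :
    pvPass2 p ((code, name, level) :: rest) =
      (if pvNormCode code != "" && (p.get? (pvNormCode code)).isSome then
        some (pvNormCode code, pvMuniName name, p.get? (pvNormCode code))
      else pvPass2 p rest) := by
  simp only [pvPass2]

theorem pv_p3_cons (p : PySem.Dict String Int) (code name level : Option String)
    (rest : List (Option String × Option String × Option String)) :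
    pvPass3 p ((code, name, level) :: rest) =
      (if pvNormCode code != "" then
        some (pvNormCode code, pvMuniName name, p.get? (pvNormCode code))
      else pvPass3 p rest) := by
  simp only [pvPass3]

theorem pv_bl_cons (d : PySem.Dict String String) (p : PySem.Dict String Int) (ck nk lk : String)
    (rest : List (String × String × String)) (best : Option (Nat × String × Option String)) :
    pvBLoop d p ((ck, nk, lk) :: rest) best =
      (if pvNormCode (d.get? ck) == "" then pvBLoop d p rest best
      else
        pvBLoop d p rest
          (match best with
           | none => some ((if pvIsMunicipalLevel (d.get? lk) then 0
                            else if (p.get? (pvNormCode (d.get? ck))).isSome then 1 else 2 : Nat),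
                           pvNormCode (d.get? ck), d.get? nk)
           | some (bt, _z, _nm) =>
               if (if pvIsMunicipalLevel (d.get? lk) then 0
                   else if (p.get? (pvNormCode (d.get? ck))).isSome then 1 else 2 : Nat) < bt then
                 some ((if pvIsMunicipalLevel (d.get? lk) then 0
                        else if (p.get? (pvNormCode (d.get? ck))).isSome then 1 else 2 : Nat),
                       pvNormCode (d.get? ck), d.get? nk)
               else best)) := by
  simp only [pvBLoop]

set_option maxHeartbeats 4000000 in
theorem pv_key (p : PySem.Dict String Int)
    (c1 n1 l1 c2 n2 l2 c3 n3 l3 : Option String)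
    (d : PySem.Dict String String)
    (h1c : d.get? "mandate_territory_code" = c1) (h1n : d.get? "mandate_territory_name" = n1)
    (h1l : d.get? "mandate_territory_level" = l1)
    (h2c : d.get? "institution_territory_code" = c2) (h2n : d.get? "institution_territory_name" = n2)
    (h2l : d.get? "institution_territory_level" = l2)
    (h3c : d.get? "person_territory_code" = c3) (h3n : d.get? "person_territory_name" = n3)
    (h3l : d.get? "person_territory_level" = l3) :
    (match pvPass1 p [(c1, n1, l1), (c2, n2, l2), (c3, n3, l3)] with
     | some r => r
     | none =>
       match pvPass2 p [(c1, n1, l1), (c2, n2, l2), (c3, n3, l3)] with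
       | some r => r
       | none =>
         match pvPass3 p [(c1, n1, l1), (c2, n2, l2), (c3, n3, l3)] with
         | some r => r
         | none => ("", "", none)) =
    (match pvBLoop d p
        [ ("mandate_territory_code", "mandate_territory_name", "mandate_territory_level"),
          ("institution_territory_code", "institution_territory_name", "institution_territory_level"),
          ("person_territory_code", "person_territory_name", "person_territory_level") ] none with
     | none => ("", "", none)
     | some (_tier, normalized, name) => (normalized, pvMuniName name, p.get? normalized)) := by
  cases hb1 : (pvNormCode c1 == "") <;> cases hb2 : (pvNormCode c2 == "") <;>
    cases hb3 : (pvNormCode c3 == "") <;>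
    cases hm1 : pvIsMunicipalLevel l1 <;> cases hm2 : pvIsMunicipalLevel l2 <;>
    cases hm3 : pvIsMunicipalLevel l3 <;>
    cases hs1 : (p.get? (pvNormCode c1)).isSome <;> cases hs2 : (p.get? (pvNormCode c2)).isSome <;>
    cases hs3 : (p.get? (pvNormCode c3)).isSome <;>
    simp only [pv_p1_cons, pv_p2_cons, pv_p3_cons, pv_p1_nil, pv_p2_nil, pv_p3_nil,
      pv_bl_cons, pv_bl_nil, h1c, h1n, h1l, h2c, h2n, h2l, h3c, h3n, h3l,
      hb1, hb2, hb3, hm1, hm2, hm3, hs1, hs2, hs3, bne,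
      Bool.not_true, Bool.not_false, Bool.true_and, Bool.false_and,
      if_true, if_false, Bool.false_eq_true, Bool.true_eq_false, reduceIte] <;>
    (try simp)

-- ===== VERDICT (by name: the statement is the Claim_ definition above) =====
set_option maxHeartbeats 4000000 in
theorem extract_municipality_fields_spec : Claim_equal_extract_municipality_fields := by
  intro row population_by_code _
  unfold Spec_extract_municipality_fields extract_municipality_fields extract_municipality_fields_alt
  exact pv_key (PySem.Dict.mk population_by_code) _ _ _ _ _ _ _ _ _ (PySem.Dict.mk row)
    rfl rfl rfl rfl rfl rfl rfl rfl rfl
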